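-- pv_equiv track=rewrite | github.com/indraminsk/decathlon | decathlon_entity.py | __calculate_frequency_distribution
-- ===== SOURCE A (Python) =====
-- def __calculate_frequency_distribution(athletes_score):
--     """calculate for each score coincidence events
--         return dictionary with this information"""
--
--     frequency_distribution = {}
--
--     for index, (athlete, score) in enumerate(athletes_score.items()):
--         if score in frequency_distribution.keys():
--             frequency_distribution[score]['coincidence'] = frequency_distribution[score]['coincidence'] + 1
--         else:
--             frequency_distribution[score] = {'place': index + 1, 'coincidence': 0}
--
--     return frequency_distribution
-- ===== SOURCE B (Python) =====
-- def __calculate_frequency_distribution(athletes_score):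
--     """dict comprehension over the first-occurrence-deduplicated scores:
--     place = 1 + first index of the score, coincidence = its count - 1"""
--
--     scores = list(athletes_score.values())
--     return {score: {'place': scores.index(score) + 1,
--                     'coincidence': scores.count(score) - 1}
--             for score in dict.fromkeys(scores)}
-- ===== Notes on version B (the rewrite author's own statement) =====
-- stated objective: idiomatic
-- what changed: B replaces A's single stateful pass (incrementing a nested dict's 'coincidence' in place) by a dict comprehension over the first-occurrence-deduplicated score list, computing place via list.index and coincidence via list.count; A is itself rebuilt via fold characterisation lemmas in the proof.
import Mathlib
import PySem

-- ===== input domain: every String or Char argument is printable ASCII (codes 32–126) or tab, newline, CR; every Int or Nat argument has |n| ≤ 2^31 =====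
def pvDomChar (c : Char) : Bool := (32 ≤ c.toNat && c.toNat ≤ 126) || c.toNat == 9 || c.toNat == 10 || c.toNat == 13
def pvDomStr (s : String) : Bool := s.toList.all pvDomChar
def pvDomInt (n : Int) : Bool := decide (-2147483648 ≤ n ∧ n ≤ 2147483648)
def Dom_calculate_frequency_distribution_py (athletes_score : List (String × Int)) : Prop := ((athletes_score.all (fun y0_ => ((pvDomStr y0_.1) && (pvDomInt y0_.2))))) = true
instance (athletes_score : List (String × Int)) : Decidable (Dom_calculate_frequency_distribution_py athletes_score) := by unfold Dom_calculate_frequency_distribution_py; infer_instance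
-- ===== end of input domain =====

-- B replaces A's stateful incremental pass by a comprehension over the deduplicated score
-- list using index/count (objective: more idiomatic; same result, quadratic instead of linear).

-- ===== PORT A =====
-- A iterates once; on a repeated score it bumps the stored 'coincidence' in place,
-- otherwise it inserts {'place': index+1, 'coincidence': 0}.
def calculate_frequency_distribution_py (athletes_score : List (String × Int)) : List (Int × List (String × Int)) :=
  let frequency_distribution :=
    (PySem.List.enumerate athletes_score).foldl
      (fun fd p =>
        if fd.contains p.2.2 then
          -- fd[score]['coincidence'] = fd[score]['coincidence'] + 1 : Dict.modify is exact
          -- (the key is present in this branch, so the getD default is never used)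
          fd.modify p.2.2 PySem.Dict.empty (fun inner => inner.insert "coincidence" (inner.getD "coincidence" 0 + 1))
        else
          fd.insert p.2.2 (PySem.Dict.ofList [("place", p.1 + 1), ("coincidence", 0)]))
      PySem.Dict.empty
  frequency_distribution.items.map (fun q => (q.1, q.2.items))

-- ===== PORT B =====
-- dict comprehension over dict.fromkeys(scores) (= PySem.List.dedup, first occurrences in
-- order); scores.index(score) never raises since score ∈ scores, so getD 0 is exact.
def calculate_frequency_distribution_py_alt (athletes_score : List (String × Int)) : List (Int × List (String × Int)) :=
  let scores := athletes_score.map (fun p => p.2)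
  (PySem.List.dedup scores).map (fun score =>
    (score, [("place", (((PySem.List.index? scores score).getD 0 : Nat) : Int) + 1),
             ("coincidence", (PySem.List.count scores score : Int) - 1)]))

-- ===== PRECONDITION & SPEC =====
def Spec_calculate_frequency_distribution_py (athletes_score : List (String × Int)) (out : List (Int × List (String × Int))) : Prop := out = calculate_frequency_distribution_py_alt athletes_score
instance (athletes_score : List (String × Int)) (out : List (Int × List (String × Int))) : Decidable (Spec_calculate_frequency_distribution_py athletes_score out) := by unfold Spec_calculate_frequency_distribution_py; infer_instance

-- ===== CLAIM (what is proved, stated in full; the proofs are below) =====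
def Claim_equal_calculate_frequency_distribution_py : Prop := ∀ (athletes_score : List (String × Int)), Dom_calculate_frequency_distribution_py athletes_score → Spec_calculate_frequency_distribution_py athletes_score (calculate_frequency_distribution_py athletes_score)

-- ===== LEMMAS AND PROOFS =====

-- the inner dict {'place': pl, 'coincidence': c}
def innerFD (pl c : Int) : PySem.Dict String Int :=
  PySem.Dict.ofList [("place", pl), ("coincidence", c)]

-- A's loop body
def stepA (fd : PySem.Dict Int (PySem.Dict String Int)) (p : Int × String × Int) :
    PySem.Dict Int (PySem.Dict String Int) :=
  if fd.contains p.2.2 then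
    fd.modify p.2.2 PySem.Dict.empty (fun inner => inner.insert "coincidence" (inner.getD "coincidence" 0 + 1))
  else
    fd.insert p.2.2 (PySem.Dict.ofList [("place", p.1 + 1), ("coincidence", 0)])

-- insert-only intermediate loop body (proof device: A with the increments replaced by counts)
def stepB (counts : PySem.Dict Int Int) (fd : PySem.Dict Int (PySem.Dict String Int))
    (p : Int × String × Int) : PySem.Dict Int (PySem.Dict String Int) :=
  if fd.contains p.2.2 then fd
  else
    fd.insert p.2.2 (PySem.Dict.ofList [("place", p.1 + 1), ("coincidence", counts.getD p.2.2 0 - 1)])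

-- bumpFD d sc : every stored coincidence raised by the number of occurrences of its key in sc
def bumpFD (d : PySem.Dict Int (PySem.Dict String Int)) (sc : List Int) :
    PySem.Dict Int (PySem.Dict String Int) :=
  PySem.Dict.mk (d.items.map (fun q =>
    (q.1, q.2.insert "coincidence" (q.2.getD "coincidence" 0 + (sc.count q.1 : Int)))))

-- the new entries appended by the insert-only loop, given the set 'seen' of present keys
def newPart (c : PySem.Dict Int Int) :
    List (Int × String × Int) → List Int → List (Int × PySem.Dict String Int)
  | [], _ => []
  | p :: r, seen =>
    if seen.contains p.2.2 then newPart c r seen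
    else (p.2.2, PySem.Dict.ofList [("place", p.1 + 1), ("coincidence", c.getD p.2.2 0 - 1)]) ::
      newPart c r (p.2.2 :: seen)

-- (score, 1-based place) of each first occurrence not in 'seen', places counted from i
def firstOcc (i : Int) : List Int → List Int → List (Int × Int)
  | [], _ => []
  | s :: r, seen =>
    if seen.contains s then firstOcc (i + 1) r seen
    else (s, i + 1) :: firstOcc (i + 1) r (s :: seen)

-- first-occurrence dedup excluding 'seen'
def fddL : List Int → List Int → List Int
  | [], _ => []
  | s :: r, seen => if seen.contains s then fddL r seen else s :: fddL r (s :: seen)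

lemma innerFD_insert (pl c x : Int) : (innerFD pl c).insert "coincidence" x = innerFD pl x := rfl

lemma innerFD_getD (pl c : Int) : (innerFD pl c).getD "coincidence" 0 = c := rfl

lemma bumpFD_contains (d : PySem.Dict Int (PySem.Dict String Int)) (sc : List Int) (s : Int) :
    (bumpFD d sc).contains s = d.contains s := by
  simp [bumpFD, PySem.Dict.contains, List.any_map, Function.comp_def]

lemma not_contains_ne (d : PySem.Dict Int (PySem.Dict String Int)) (s : Int)
    (h : d.contains s = false) : ∀ q ∈ d.items, q.1 ≠ s := by
  intro q hq
  simp [PySem.Dict.contains] at h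
  exact h q.1 q.2 (by simpa using hq)

-- the main invariant: running A's loop from d equals running the insert-only loop from the
-- bumped d, provided counts is correct for every key not yet in d
lemma mainFD (counts : PySem.Dict Int Int) :
    ∀ (l : List (Int × String × Int)) (d : PySem.Dict Int (PySem.Dict String Int)),
      d.keys.Nodup →
      (∀ q ∈ d.items, ∃ pl c, q.2 = innerFD pl c) →
      (∀ s, d.contains s = false →
        counts.getD s 0 = ((l.map (fun p => p.2.2)).count s : Int)) →
      l.foldl stepA d = l.foldl (stepB counts) (bumpFD d (l.map (fun p => p.2.2))) := by
  intro l
  induction l with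
  | nil =>
    intro d hnd hsh hc
    simp only [List.foldl_nil, List.map_nil]
    apply PySem.Dict.ext
    show d.items = (d.items.map _)
    conv_lhs => rw [← List.map_id d.items]
    refine (List.map_congr_left ?_).symm
    intro q hq
    obtain ⟨pl, c, hq2⟩ := hsh q hq
    have : (q.1, q.2) = q := rfl
    rw [← this, hq2]
    simp [innerFD_getD, innerFD_insert]
  | cons p r ih =>
    intro d hnd hsh hc
    obtain ⟨i, name, s⟩ := p
    simp only [List.foldl_cons, List.map_cons]
    by_cases h : d.contains s
    · -- repeated score: A bumps the entry in place, the insert-only loop skips it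
      have hsome : (d.get? s).isSome := by rw [← PySem.Dict.contains_eq_isSome_get?]; exact h
      obtain ⟨v, hv⟩ := Option.isSome_iff_exists.mp hsome
      obtain ⟨pl, c, hvs⟩ := hsh (s, v) (PySem.Dict.mem_items_of_get?_eq_some d hv)
      simp only at hvs
      have hgetD : d.getD s PySem.Dict.empty = innerFD pl c := by
        rw [PySem.Dict.getD_eq_get?_getD, hv, hvs]; rfl
      have hA : stepA d (i, name, s) = d.insert s (innerFD pl (c + 1)) := by
        simp only [stepA, h, if_true]
        show d.insert s _ = _
        rw [hgetD]
        show d.insert s ((innerFD pl c).insert "coincidence" ((innerFD pl c).getD "coincidence" 0 + 1))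
            = d.insert s (innerFD pl (c + 1))
        rw [innerFD_getD, innerFD_insert]
      have hB : stepB counts (bumpFD d (s :: r.map (fun p => p.2.2))) (i, name, s)
          = bumpFD d (s :: r.map (fun p => p.2.2)) := by
        simp [stepB, bumpFD_contains, h]
      rw [hA, hB]
      have hbump : bumpFD (d.insert s (innerFD pl (c + 1))) (r.map (fun p => p.2.2))
          = bumpFD d (s :: r.map (fun p => p.2.2)) := by
        apply PySem.Dict.ext
        show ((d.insert s (innerFD pl (c + 1))).items.map _) = (d.items.map _)
        rw [PySem.Dict.items_insert, if_pos h, List.map_map]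
        apply List.map_congr_left
        intro q hq
        by_cases hqs : q.1 = s
        · have hq2 : q.2 = innerFD pl c := by
            have h1 : d.get? q.1 = some q.2 := PySem.Dict.get?_of_mem_items d (by simpa using hq) hnd
            rw [hqs, hv] at h1
            rw [← hvs]; exact (Option.some.inj h1).symm
          simp only [Function.comp_def, hqs, BEq.rfl, if_true, hq2,
            innerFD_getD, innerFD_insert, List.count_cons_self]
          have harith : c + 1 + ((List.count s (List.map (fun p => p.2.2) r) : Int))
              = c + ((List.count s (List.map (fun p => p.2.2) r) + 1 : Nat) : Int) := by
            push_cast; omega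
          rw [harith]
        · have hbq : (q.1 == s) = false := by simpa using hqs
          simp [hqs, List.count_cons_of_ne (Ne.symm hqs)]
      rw [← hbump]
      apply ih
      · exact PySem.Dict.nodup_keys_insert _ _ _ hnd
      · intro q hq
        rw [PySem.Dict.mem_items_insert] at hq
        rcases hq with hq | ⟨hq, _⟩
        · exact ⟨pl, c + 1, by rw [hq]⟩
        · exact hsh q hq
      · intro t ht
        rw [PySem.Dict.contains_insert] at ht
        simp only [Bool.or_eq_false_iff, beq_eq_false_iff_ne] at ht
        rw [hc t ht.2, List.map_cons, List.count_cons_of_ne (Ne.symm ht.1)]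
    · -- first occurrence: A inserts coincidence 0, the other inserts count - 1
      have hA : stepA d (i, name, s) = d.insert s (innerFD (i + 1) 0) := by
        simp only [stepA, h]; rfl
      have hB : stepB counts (bumpFD d (s :: r.map (fun p => p.2.2))) (i, name, s)
          = (bumpFD d (s :: r.map (fun p => p.2.2))).insert s (innerFD (i + 1) (counts.getD s 0 - 1)) := by
        simp only [stepB, bumpFD_contains, h]; rfl
      rw [hA, hB]
      have hbump : bumpFD (d.insert s (innerFD (i + 1) 0)) (r.map (fun p => p.2.2))
          = (bumpFD d (s :: r.map (fun p => p.2.2))).insert s (innerFD (i + 1) (counts.getD s 0 - 1)) := by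
        apply PySem.Dict.ext
        rw [PySem.Dict.items_insert, bumpFD_contains, if_neg (by simp [h])]
        show ((d.insert s (innerFD (i + 1) 0)).items.map _) = (d.items.map _) ++ _
        rw [PySem.Dict.items_insert, if_neg (by simp [h]), List.map_append]
        congr 1
        · apply List.map_congr_left
          intro q hq
          rw [List.count_cons_of_ne (Ne.symm (not_contains_ne d s (by simpa using h) q hq))]
        · simp only [List.map_cons, List.map_nil, innerFD_getD, innerFD_insert]
          have := hc s (by simpa using h)
          rw [List.map_cons, List.count_cons_self] at this
          rw [this]
          have harith : (0 : Int) + ((List.count s (List.map (fun p => p.2.2) r) : Int))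
              = ((List.count s (List.map (fun p => p.2.2) r) + 1 : Nat) : Int) - 1 := by
            push_cast; omega
          rw [harith]
      rw [← hbump]
      apply ih
      · exact PySem.Dict.nodup_keys_insert _ _ _ hnd
      · intro q hq
        rw [PySem.Dict.mem_items_insert] at hq
        rcases hq with hq | ⟨hq, _⟩
        · exact ⟨i + 1, 0, by rw [hq]⟩
        · exact hsh q hq
      · intro t ht
        rw [PySem.Dict.contains_insert] at ht
        simp only [Bool.or_eq_false_iff, beq_eq_false_iff_ne] at ht
        rw [hc t ht.2, List.map_cons, List.count_cons_of_ne (Ne.symm ht.1)]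

lemma dict_contains_eq_keys_contains {ν : Type} (d : PySem.Dict Int ν) (k : Int) :
    d.contains k = d.keys.contains k := by
  rw [PySem.Dict.contains_eq_decide_mem_keys]
  simp

lemma newPart_congr (c : PySem.Dict Int Int) :
    ∀ (l : List (Int × String × Int)) (seen seen' : List Int),
      (∀ x, seen.contains x = seen'.contains x) → newPart c l seen = newPart c l seen' := by
  intro l
  induction l with
  | nil => intro _ _ _; rfl
  | cons p r ih =>
    intro seen seen' hmem
    have hcons : ∀ x, (p.2.2 :: seen).contains x = (p.2.2 :: seen').contains x := by
      intro x; simp only [List.contains_cons, hmem x]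
    by_cases h : seen'.contains p.2.2 = true
    · simp only [newPart, hmem p.2.2, h, if_true]; exact ih seen seen' hmem
    · simp only [newPart, hmem p.2.2, if_neg h]
      rw [ih (p.2.2 :: seen) (p.2.2 :: seen') hcons]

lemma fddL_congr :
    ∀ (l : List Int) (seen seen' : List Int),
      (∀ x, seen.contains x = seen'.contains x) → fddL l seen = fddL l seen' := by
  intro l
  induction l with
  | nil => intro _ _ _; rfl
  | cons s r ih =>
    intro seen seen' hmem
    have hcons : ∀ x, (s :: seen).contains x = (s :: seen').contains x := by
      intro x; simp only [List.contains_cons, hmem x]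
    by_cases h : seen'.contains s = true
    · simp only [fddL, hmem s, h, if_true]; exact ih seen seen' hmem
    · simp only [fddL, hmem s, if_neg h]
      rw [ih (s :: seen) (s :: seen') hcons]

-- the insert-only fold appends exactly the newPart entries
lemma foldl_stepB_items (c : PySem.Dict Int Int) :
    ∀ (l : List (Int × String × Int)) (d : PySem.Dict Int (PySem.Dict String Int)),
      (l.foldl (stepB c) d).items = d.items ++ newPart c l d.keys := by
  intro l
  induction l with
  | nil => intro d; simp [newPart]
  | cons p r ih =>
    intro d
    simp only [List.foldl_cons, newPart, ← dict_contains_eq_keys_contains]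
    by_cases h : d.contains p.2.2
    · simp only [h, if_true]
      have : stepB c d p = d := by simp [stepB, h]
      rw [this, ih]
    · simp only [h]
      have hstep : stepB c d p
          = d.insert p.2.2 (PySem.Dict.ofList [("place", p.1 + 1), ("coincidence", c.getD p.2.2 0 - 1)]) := by
        simp [stepB, h]
      rw [hstep, ih, PySem.Dict.items_insert, if_neg h]
      rw [List.append_assoc, List.singleton_append]
      congr 2
      have hkeys : (d.insert p.2.2 (PySem.Dict.ofList [("place", p.1 + 1), ("coincidence", c.getD p.2.2 0 - 1)])).keys
          = d.keys ++ [p.2.2] := PySem.Dict.keys_insert_of_not_contains _ _ (by simpa using h)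
      rw [hkeys]
      apply newPart_congr
      intro x; simp [Bool.or_comm]

-- newPart over the enumerated list is firstOcc over the score list
lemma newPart_enumerate (c : PySem.Dict Int Int) :
    ∀ (l : List (String × Int)) (i : Int) (seen : List Int),
      newPart c (PySem.List.enumerate l i) seen
        = (firstOcc i (l.map (fun p => p.2)) seen).map
            (fun q => (q.1, PySem.Dict.ofList [("place", q.2), ("coincidence", c.getD q.1 0 - 1)])) := by
  intro l
  induction l with
  | nil => intro i seen; simp [PySem.List.enumerate_nil, newPart, firstOcc]
  | cons p r ih =>
    intro i seen
    rw [PySem.List.enumerate_cons]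
    simp only [newPart, List.map_cons, firstOcc]
    by_cases h : seen.contains p.2 = true
    · simp only [h, if_true]; exact ih (i + 1) seen
    · simp only [if_neg h, List.map_cons]
      rw [ih (i + 1) (p.2 :: seen)]

lemma mem_fddL :
    ∀ (l seen : List Int) (x : Int), x ∈ fddL l seen → x ∈ l ∧ seen.contains x = false := by
  intro l
  induction l with
  | nil => intro seen x hx; simp [fddL] at hx
  | cons s r ih =>
    intro seen x hx
    simp only [fddL] at hx
    by_cases h : seen.contains s
    · rw [if_pos h] at hx
      obtain ⟨h1, h2⟩ := ih seen x hx
      exact ⟨List.mem_cons_of_mem _ h1, h2⟩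
    · rw [if_neg h] at hx
      rcases List.mem_cons.mp hx with hx | hx
      · subst hx; exact ⟨List.mem_cons_self, by simpa using h⟩
      · obtain ⟨h1, h2⟩ := ih (s :: seen) x hx
        simp only [List.contains_cons, Bool.or_eq_false_iff] at h2
        exact ⟨List.mem_cons_of_mem _ h1, h2.2⟩

-- firstOcc records, for each deduped score, i + its index in the scores list + 1
lemma firstOcc_eq_fddL :
    ∀ (scores seen : List Int) (i : Int),
      firstOcc i scores seen
        = (fddL scores seen).map
            (fun s => (s, i + (((PySem.List.index? scores s).getD 0 : Nat) : Int) + 1)) := by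
  intro scores
  induction scores with
  | nil => intro seen i; simp [firstOcc, fddL]
  | cons s r ih =>
    intro seen i
    simp only [firstOcc, fddL]
    by_cases h : seen.contains s = true
    · simp only [h, if_true]
      rw [ih seen (i + 1)]
      apply List.map_congr_left
      intro x hx
      obtain ⟨hxr, hxs⟩ := mem_fddL r seen x hx
      have hne : s ≠ x := by
        intro he; subst he; rw [h] at hxs; exact absurd hxs (by simp)
      rw [PySem.List.index?_cons_of_ne r hne]
      obtain ⟨k, hk⟩ := Option.isSome_iff_exists.mp ((PySem.List.index?_isSome_iff r x).mpr hxr)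
      rw [hk]
      simp only [Option.map_some, Option.getD_some]
      congr 1
      push_cast; ring
    · simp only [if_neg h, List.map_cons]
      rw [ih (s :: seen) (i + 1)]
      congr 1
      · rw [PySem.List.index?_cons_self]
        simp
      · apply List.map_congr_left
        intro x hx
        obtain ⟨hxr, hxs⟩ := mem_fddL r (s :: seen) x hx
        simp only [List.contains_cons, Bool.or_eq_false_iff, beq_eq_false_iff_ne] at hxs
        have hne : s ≠ x := fun he => hxs.1 (he.symm)
        rw [PySem.List.index?_cons_of_ne r hne]
        obtain ⟨k, hk⟩ := Option.isSome_iff_exists.mp ((PySem.List.index?_isSome_iff r x).mpr hxr)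
        rw [hk]
        simp only [Option.map_some, Option.getD_some]
        congr 1
        push_cast; ring

lemma foldl_add_eq_fddL :
    ∀ (l acc : List Int), l.foldl PySem.Set.add acc = acc ++ fddL l acc := by
  intro l
  induction l with
  | nil => intro acc; simp [fddL]
  | cons s r ih =>
    intro acc
    simp only [List.foldl_cons, fddL]
    by_cases h : acc.contains s = true
    · have : PySem.Set.add acc s = acc := PySem.Set.add_of_mem (by simpa using h)
      rw [this, if_pos h, ih]
    · have : PySem.Set.add acc s = acc ++ [s] := PySem.Set.add_of_not_mem (by simpa using h)
      rw [this, if_neg h, ih]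
      rw [List.append_assoc, List.singleton_append]
      congr 2
      apply fddL_congr
      intro x; simp [Bool.or_comm]

lemma dedup_eq_fddL (l : List Int) : PySem.List.dedup l = fddL l [] := by
  rw [PySem.List.dedup_eq_ofList, PySem.Set.ofList_eq_foldl, foldl_add_eq_fddL]
  rfl

lemma inner_items (pl co : Int) :
    (PySem.Dict.ofList [("place", pl), ("coincidence", co)]).items
      = [("place", pl), ("coincidence", co)] := rfl

-- ===== VERDICT (by name: the statement is the Claim_ definition above) =====
theorem calculate_frequency_distribution_py_spec : Claim_equal_calculate_frequency_distribution_py := by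
  intro l _
  show calculate_frequency_distribution_py l = calculate_frequency_distribution_py_alt l
  have hA : calculate_frequency_distribution_py l
      = (((PySem.List.enumerate l).foldl stepA PySem.Dict.empty).items.map (fun q => (q.1, q.2.items))) := rfl
  rw [hA]
  have hmap : (PySem.List.enumerate l).map (fun p => p.2.2) = l.map (fun p => p.2) := by
    rw [show (fun p : Int × String × Int => p.2.2)
        = (fun x : String × Int => x.2) ∘ (fun p : Int × String × Int => p.2) from rfl,
      ← List.map_map, PySem.List.map_snd_enumerate]
  have hmain := mainFD (PySem.Dict.counter (l.map (fun p => p.2))) (PySem.List.enumerate l)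
    PySem.Dict.empty PySem.Dict.nodup_keys_empty
    (by intro q hq; simp [PySem.Dict.empty] at hq)
    (by intro t _; rw [hmap, PySem.Dict.getD_counter])
  rw [show bumpFD PySem.Dict.empty ((PySem.List.enumerate l).map (fun p => p.2.2))
      = PySem.Dict.empty from rfl] at hmain
  rw [hmain, foldl_stepB_items]
  rw [show (PySem.Dict.empty : PySem.Dict Int (PySem.Dict String Int)).items = [] from rfl,
    show (PySem.Dict.empty : PySem.Dict Int (PySem.Dict String Int)).keys = [] from rfl,
    List.nil_append]
  rw [newPart_enumerate, firstOcc_eq_fddL, ← dedup_eq_fddL]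
  show _ = calculate_frequency_distribution_py_alt l
  unfold calculate_frequency_distribution_py_alt
  simp only [List.map_map]
  apply List.map_congr_left
  intro s _
  simp only [Function.comp_def, inner_items, PySem.Dict.getD_counter, PySem.List.count_eq, zero_add]
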